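-- pv_equiv track=rewrite | github.com/sarwarerror/CASM | src/cpp_asm_converter.py | parse_arm64_operands
-- ===== SOURCE A (Python) =====
-- def parse_arm64_operands(operands_str):
--     """Parse ARM64 operands, respecting brackets."""
--     if not operands_str:
--         return []
--
--     operands = []
--     current = ""
--     bracket_depth = 0
--
--     for char in operands_str:
--         if char == '[':
--             bracket_depth += 1
--             current += char
--         elif char == ']':
--             bracket_depth -= 1
--             current += char
--         elif char == ',' and bracket_depth == 0:
--             operands.append(current.strip())
--             current = ""
--         else:
--             current += char
--
--     if current.strip():
--         operands.append(current.strip())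
--
--     return operands
-- ===== SOURCE B (Python) =====
-- def _split_first(s):
--     """Locate the first comma at bracket depth 0; return (before, after) or None."""
--     depth = 0
--     for i, ch in enumerate(s):
--         if ch == '[':
--             depth += 1
--         elif ch == ']':
--             depth -= 1
--         elif ch == ',' and depth == 0:
--             return s[:i], s[i + 1:]
--     return None
--
--
-- def parse_arm64_operands(operands_str):
--     """Parse ARM64 operands, respecting brackets."""
--     segs = []
--     s = operands_str
--     while True:
--         cut = _split_first(s)
--         if cut is None:
--             break
--         head, s = cut
--         segs.append(head.strip())
--     last = s.strip()
--     if last: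
--         segs.append(last)
--     return segs
-- ===== Notes on version B (the rewrite author's own statement) =====
-- stated objective: alternative
-- what changed: Replaced A's single char-by-char accumulation loop (current-buffer + depth state, flush on top-level comma) by a two-level decomposition: a helper that finds the first depth-0 comma and slices the string around it, and an outer loop that repeatedly cuts off one segment, stripping each; the trailing segment is appended only if non-empty.
import Mathlib
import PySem

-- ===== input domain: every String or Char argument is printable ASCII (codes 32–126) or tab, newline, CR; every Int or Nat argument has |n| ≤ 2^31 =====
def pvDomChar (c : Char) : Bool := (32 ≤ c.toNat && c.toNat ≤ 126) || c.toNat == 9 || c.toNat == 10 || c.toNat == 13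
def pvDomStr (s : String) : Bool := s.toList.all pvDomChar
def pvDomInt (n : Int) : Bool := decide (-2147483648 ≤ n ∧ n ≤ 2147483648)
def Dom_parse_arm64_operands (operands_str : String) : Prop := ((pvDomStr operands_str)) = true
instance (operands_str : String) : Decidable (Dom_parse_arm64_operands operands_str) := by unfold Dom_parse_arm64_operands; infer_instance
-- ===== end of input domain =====

-- B replaces A's one accumulating scan by repeated cut-at-first-top-level-comma slicing (alternative decomposition, same cost).

-- ===== PORT A =====
-- one loop step of A: state = (operands, current, bracket_depth)
def stepA (st : List (List Char) × List Char × Int) (c : Char) : List (List Char) × List Char × Int :=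
  let (ops, cur, d) := st
  if c = '[' then (ops, cur ++ [c], d + 1)
  else if c = ']' then (ops, cur ++ [c], d - 1)
  else if c = ',' ∧ d = 0 then (ops ++ [PySem.Chars.strip cur], [], d)
  else (ops, cur ++ [c], d)

def parse_arm64_operands (operands_str : String) : List String :=
  if operands_str = "" then []
  else
    let st := operands_str.toList.foldl stepA ([], [], 0)
    let ops := if PySem.Chars.strip st.2.1 ≠ [] then st.1 ++ [PySem.Chars.strip st.2.1] else st.1
    ops.map String.ofList

-- ===== PORT B =====
-- index of the first comma at bracket depth 0 (the `for i, ch in enumerate(s)` loop of _split_first)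
def splitFirstGo : List Char → Int → Nat → Option Nat
  | [], _, _ => none
  | c :: rest, depth, i =>
    if c = '[' then splitFirstGo rest (depth + 1) (i + 1)
    else if c = ']' then splitFirstGo rest (depth - 1) (i + 1)
    else if c = ',' ∧ depth = 0 then some i
    else splitFirstGo rest depth (i + 1)

-- _split_first: (s[:i], s[i+1:]) around the first depth-0 comma, or none
def splitFirst (s : List Char) : Option (List Char × List Char) :=
  match splitFirstGo s 0 0 with
  | none => none
  | some i => some (s.take i, s.drop (i + 1))

theorem splitFirstGo_shift (s : List Char) : ∀ d i, splitFirstGo s d i = (splitFirstGo s d 0).map (· + i) := by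
  induction s with
  | nil => intro d i; simp [splitFirstGo]
  | cons c rest ih =>
    intro d i
    simp only [splitFirstGo]
    split_ifs with h1 h2 h3
    · rw [ih, ih (d + 1) 1, Option.map_map]; congr 1; funext j; simp; omega
    · rw [ih, ih (d - 1) 1, Option.map_map]; congr 1; funext j; simp; omega
    · simp
    · rw [ih, ih d 1, Option.map_map]; congr 1; funext j; simp; omega

theorem splitFirstGo_lt (s : List Char) : ∀ d i, splitFirstGo s d 0 = some i → i < s.length := by
  induction s with
  | nil => intro d i h; simp [splitFirstGo] at h
  | cons c rest ih =>
    intro d i h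
    simp only [splitFirstGo] at h
    split_ifs at h with h1 h2 h3
    · rw [splitFirstGo_shift] at h
      rcases Option.map_eq_some_iff.mp h with ⟨j, hj, rfl⟩
      have := ih _ _ hj; simp; omega
    · rw [splitFirstGo_shift] at h
      rcases Option.map_eq_some_iff.mp h with ⟨j, hj, rfl⟩
      have := ih _ _ hj; simp; omega
    · simp at h; simp; omega
    · rw [splitFirstGo_shift] at h
      rcases Option.map_eq_some_iff.mp h with ⟨j, hj, rfl⟩
      have := ih _ _ hj; simp; omega

theorem splitFirst_lt {s head rest : List Char} (h : splitFirst s = some (head, rest)) :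
    rest.length < s.length := by
  unfold splitFirst at h
  cases hg : splitFirstGo s 0 0 with
  | none => rw [hg] at h; cases h
  | some i =>
    rw [hg] at h
    have hi := splitFirstGo_lt s 0 i hg
    simp only [Option.some.injEq, Prod.mk.injEq] at h
    rw [← h.2]; simp; omega

-- the `while True` loop of B, accumulating stripped segments
def altGo (segs : List (List Char)) (s : List Char) : List (List Char) :=
  match h : splitFirst s with
  | none =>
      if PySem.Chars.strip s = [] then segs else segs ++ [PySem.Chars.strip s]
  | some (head, rest) => altGo (segs ++ [PySem.Chars.strip head]) rest
termination_by s.length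
decreasing_by exact splitFirst_lt h

def parse_arm64_operands_alt (operands_str : String) : List String :=
  (altGo [] operands_str.toList).map String.ofList

-- ===== PRECONDITION & SPEC =====
def Spec_parse_arm64_operands (operands_str : String) (out : List String) : Prop := out = parse_arm64_operands_alt operands_str
instance (operands_str : String) (out : List String) : Decidable (Spec_parse_arm64_operands operands_str out) := by unfold Spec_parse_arm64_operands; infer_instance

-- ===== CLAIM (what is proved, stated in full; the proofs are below) =====
def Claim_equal_parse_arm64_operands : Prop := ∀ (operands_str : String), Dom_parse_arm64_operands operands_str → Spec_parse_arm64_operands operands_str (parse_arm64_operands operands_str)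

-- ===== LEMMAS AND PROOFS =====

-- generalized splitFirst starting at arbitrary depth (proof device)
def sf (s : List Char) (d : Int) : Option (List Char × List Char) :=
  match splitFirstGo s d 0 with
  | none => none
  | some i => some (s.take i, s.drop (i + 1))

theorem sf_zero (s : List Char) : sf s 0 = splitFirst s := rfl

theorem sf_cons (c : Char) (rest : List Char) (d : Int) :
    sf (c :: rest) d =
      if c = '[' then (sf rest (d + 1)).map (fun p => (c :: p.1, p.2))
      else if c = ']' then (sf rest (d - 1)).map (fun p => (c :: p.1, p.2))
      else if c = ',' ∧ d = 0 then some ([], rest)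
      else (sf rest d).map (fun p => (c :: p.1, p.2)) := by
  unfold sf
  simp only [splitFirstGo]
  split_ifs with h1 h2 h3
  · rw [splitFirstGo_shift]; cases splitFirstGo rest (d + 1) 0 <;> simp
  · rw [splitFirstGo_shift]; cases splitFirstGo rest (d - 1) 0 <;> simp
  · simp
  · rw [splitFirstGo_shift]; cases splitFirstGo rest d 0 <;> simp

theorem foldl_stepA_none (s : List Char) : ∀ d ops cur, sf s d = none →
    ∃ d', List.foldl stepA (ops, cur, d) s = (ops, cur ++ s, d') := by
  induction s with
  | nil => intro d ops cur _; exact ⟨d, by simp⟩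
  | cons c rest ih =>
    intro d ops cur h
    rw [sf_cons] at h
    simp only [List.foldl_cons, stepA]
    split_ifs at h ⊢ with h1 h2 h3
    · rcases ih (d + 1) ops (cur ++ [c]) (Option.map_eq_none_iff.mp h) with ⟨d', hd⟩
      exact ⟨d', by simpa using hd⟩
    · rcases ih (d - 1) ops (cur ++ [c]) (Option.map_eq_none_iff.mp h) with ⟨d', hd⟩
      exact ⟨d', by simpa using hd⟩
    · rcases ih d ops (cur ++ [c]) (Option.map_eq_none_iff.mp h) with ⟨d', hd⟩
      exact ⟨d', by simpa using hd⟩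

theorem foldl_stepA_cut (s : List Char) : ∀ d ops cur head rest, sf s d = some (head, rest) →
    List.foldl stepA (ops, cur, d) s
      = List.foldl stepA (ops ++ [PySem.Chars.strip (cur ++ head)], [], 0) rest := by
  induction s with
  | nil => intro d ops cur head rest h; simp [sf, splitFirstGo] at h
  | cons c rest' ih =>
    intro d ops cur head rest h
    rw [sf_cons] at h
    simp only [List.foldl_cons, stepA]
    split_ifs at h ⊢ with h1 h2 h3
    · rcases Option.map_eq_some_iff.mp h with ⟨⟨p, q⟩, hpq, heq⟩
      simp only [Prod.mk.injEq] at heq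
      rw [ih (d + 1) ops (cur ++ [c]) p q hpq, ← heq.1, ← heq.2]
      simp
    · rcases Option.map_eq_some_iff.mp h with ⟨⟨p, q⟩, hpq, heq⟩
      simp only [Prod.mk.injEq] at heq
      rw [ih (d - 1) ops (cur ++ [c]) p q hpq, ← heq.1, ← heq.2]
      simp
    · simp only [Option.some.injEq, Prod.mk.injEq] at h
      rw [← h.1, ← h.2, h3.2]
      simp
    · rcases Option.map_eq_some_iff.mp h with ⟨⟨p, q⟩, hpq, heq⟩
      simp only [Prod.mk.injEq] at heq
      rw [ih d ops (cur ++ [c]) p q hpq, ← heq.1, ← heq.2]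
      simp

theorem foldl_stepA_eq_altGo (ops : List (List Char)) (s : List Char) :
    (let st := List.foldl stepA (ops, [], 0) s
     if PySem.Chars.strip st.2.1 ≠ [] then st.1 ++ [PySem.Chars.strip st.2.1] else st.1)
      = altGo ops s := by
  induction ops, s using altGo.induct with
  | case1 segs s h hstrip =>
    rw [altGo.eq_def]
    rcases foldl_stepA_none s 0 segs [] (by rw [sf_zero]; exact h) with ⟨d', hd⟩
    rw [hd]
    simp_all
    split <;> simp_all
  | case2 segs s h hstrip =>
    rw [altGo.eq_def]
    rcases foldl_stepA_none s 0 segs [] (by rw [sf_zero]; exact h) with ⟨d', hd⟩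
    rw [hd]
    simp_all
    split <;> simp_all
  | case3 segs s head rest h ih =>
    rw [altGo.eq_def]
    rw [foldl_stepA_cut s 0 segs [] head rest (by rw [sf_zero]; exact h)]
    split
    · rename_i hnone; rw [hnone] at h; cases h
    · rename_i head' rest' hsome
      rw [hsome] at h
      simp only [Option.some.injEq, Prod.mk.injEq] at h
      obtain ⟨e1, e2⟩ := h
      subst e1; subst e2
      simpa using ih

-- ===== VERDICT (by name: the statement is the Claim_ definition above) =====
theorem parse_arm64_operands_spec : Claim_equal_parse_arm64_operands := by
  intro s _
  unfold Spec_parse_arm64_operands parse_arm64_operands parse_arm64_operands_alt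
  split
  · next he =>
    subst he
    rw [altGo.eq_def]
    simp [splitFirst, splitFirstGo, PySem.Chars.strip, PySem.Chars.lstrip, PySem.Chars.rstrip]
  · next he =>
    rw [← foldl_stepA_eq_altGo [] s.toList]
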